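-- pv_equiv track=rewrite | github.com/pypi-data/pypi-mirror-351 | packages/cardquant/cardquant-0.1.10.tar.gz/cardquant-0.1.10/cardquant/IMC.py | _deck_max_sum_with_seen
-- ===== SOURCE A (Python) =====
-- from collections import Counter
--
-- def _deck_max_sum_with_seen(n_val: int, known_cards: list[int], deck_list: list[int]) -> int:
--     temp_deck = Counter(deck_list)
--     temp_deck.subtract(Counter(known_cards))
--     if any(count < 0 for count in temp_deck.values()):
--         raise ValueError("Invalid known_cards or deck state for _deck_max_sum_with_seen.")
--
--     max_sum_val, needed = 0, n_val
--     for rank_val in sorted(temp_deck.keys(), reverse=True):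
--         if temp_deck[rank_val] > 0 and needed > 0:
--             take = min(temp_deck[rank_val], needed)
--             max_sum_val += take * rank_val
--             needed -= take
--             if needed == 0:
--                 break
--     return max_sum_val
-- ===== SOURCE B (Python) =====
-- from collections import Counter
--
-- def _deck_max_sum_with_seen(n_val: int, known_cards: list[int], deck_list: list[int]) -> int:
--     temp_deck = Counter(deck_list)
--     temp_deck.subtract(Counter(known_cards))
--     if any(count < 0 for count in temp_deck.values()):
--         raise ValueError("Invalid known_cards or deck state for _deck_max_sum_with_seen.")
--     remaining = []
--     for rank, count in temp_deck.items():
--         if count > 0: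
--             remaining.extend([rank] * count)
--     remaining.sort(reverse=True)
--     return sum(remaining[:max(n_val, 0)])
-- ===== Notes on version B (the rewrite author's own statement) =====
-- stated objective: simpler
-- what changed: Replaces the per-rank greedy accumulation (sorted distinct ranks, min(count,needed) bookkeeping, break) with building the flat multiset of remaining cards, sorting it descending and summing its first n_val elements.
import Mathlib
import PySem

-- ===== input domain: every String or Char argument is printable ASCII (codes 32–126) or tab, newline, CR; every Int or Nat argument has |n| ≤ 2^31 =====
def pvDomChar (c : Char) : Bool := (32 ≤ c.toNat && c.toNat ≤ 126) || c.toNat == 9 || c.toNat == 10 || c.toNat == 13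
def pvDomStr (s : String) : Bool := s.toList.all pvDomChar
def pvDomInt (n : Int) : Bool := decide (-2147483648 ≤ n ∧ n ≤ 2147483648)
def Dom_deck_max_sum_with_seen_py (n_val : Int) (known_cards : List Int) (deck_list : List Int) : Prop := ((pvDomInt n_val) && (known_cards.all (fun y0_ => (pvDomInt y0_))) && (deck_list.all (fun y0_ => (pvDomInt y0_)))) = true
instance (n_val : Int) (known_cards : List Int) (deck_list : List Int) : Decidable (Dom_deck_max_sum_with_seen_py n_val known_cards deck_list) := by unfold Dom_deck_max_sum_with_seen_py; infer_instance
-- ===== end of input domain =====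

-- B replaces A's per-rank greedy accumulation with: flatten the remaining multiset, sort it
-- descending, sum the first n_val cards (objective: simpler).

-- ===== PORT A =====
-- shared first phase, literally in both Pythons: temp_deck = Counter(deck_list); temp_deck.subtract(Counter(known_cards))
-- (Counter.subtract iterates the other counter's items and sets self[k] = self.get(k, 0) - c)
def pvTempDeck (known_cards deck_list : List Int) : PySem.Dict Int Int :=
  (PySem.Dict.counter known_cards).items.foldl
    (fun d p => d.insert p.1 (d.getD p.1 0 - p.2)) (PySem.Dict.counter deck_list)

-- A's for-loop over sorted(temp_deck.keys(), reverse=True), with the break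
def pvGreedyA (d : PySem.Dict Int Int) : List Int → Int → Int → Int
  | [], max_sum_val, _ => max_sum_val
  | rank_val :: rest, max_sum_val, needed =>
    if d.getD rank_val 0 > 0 ∧ needed > 0 then
      let take := min (d.getD rank_val 0) needed
      let max_sum_val' := max_sum_val + take * rank_val
      let needed' := needed - take
      if needed' = 0 then max_sum_val' else pvGreedyA d rest max_sum_val' needed'
    else pvGreedyA d rest max_sum_val needed

def deck_max_sum_with_seen_py (n_val : Int) (known_cards : List Int) (deck_list : List Int) : Int :=
  let temp_deck := pvTempDeck known_cards deck_list
  if temp_deck.values.any (fun count => count < 0) then 0  -- Python raises ValueError here; excluded by Pre_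
  else pvGreedyA temp_deck (PySem.List.sorted temp_deck.keys (fun k => k) true) 0 n_val

-- ===== PORT B =====
def deck_max_sum_with_seen_py_alt (n_val : Int) (known_cards : List Int) (deck_list : List Int) : Int :=
  let temp_deck := pvTempDeck known_cards deck_list
  if temp_deck.values.any (fun count => count < 0) then 0  -- Python raises ValueError here; excluded by Pre_
  else
    let remaining := temp_deck.items.foldl
      (fun acc p => if p.2 > 0 then acc ++ List.replicate p.2.toNat p.1 else acc) []
    (PySem.List.slice (PySem.List.sorted remaining (fun x => x) true) none (some (max n_val 0))).sum

-- ===== PRECONDITION & SPEC =====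
-- Pre_ excludes exactly the inputs on which A (and B identically) raises ValueError:
-- some card occurs more often in known_cards than in deck_list.
def Pre_deck_max_sum_with_seen_py (n_val : Int) (known_cards : List Int) (deck_list : List Int) : Prop :=
  ∀ x ∈ known_cards, known_cards.count x ≤ deck_list.count x
instance (n_val : Int) (known_cards : List Int) (deck_list : List Int) : Decidable (Pre_deck_max_sum_with_seen_py n_val known_cards deck_list) := by unfold Pre_deck_max_sum_with_seen_py; infer_instance

def pvWitness_deck_max_sum_with_seen_py : Int × List Int × List Int := (2, [3], [3, 5, 7, 5])

def Spec_deck_max_sum_with_seen_py (n_val : Int) (known_cards : List Int) (deck_list : List Int) (out : Int) : Prop := out = deck_max_sum_with_seen_py_alt n_val known_cards deck_list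
instance (n_val : Int) (known_cards : List Int) (deck_list : List Int) (out : Int) : Decidable (Spec_deck_max_sum_with_seen_py n_val known_cards deck_list out) := by unfold Spec_deck_max_sum_with_seen_py; infer_instance

-- ===== CLAIM (what is proved, stated in full; the proofs are below) =====
def Claim_equal_deck_max_sum_with_seen_py : Prop := ∀ (n_val : Int) (known_cards : List Int) (deck_list : List Int), Dom_deck_max_sum_with_seen_py n_val known_cards deck_list → Pre_deck_max_sum_with_seen_py n_val known_cards deck_list → Spec_deck_max_sum_with_seen_py n_val known_cards deck_list (deck_max_sum_with_seen_py n_val known_cards deck_list)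

-- ===== LEMMAS AND PROOFS =====

-- the flat multiset of remaining cards, one block per rank
def pvFlat (d : PySem.Dict Int Int) (ks : List Int) : List Int :=
  ks.flatMap (fun k => List.replicate (d.getD k 0).toNat k)

-- A's greedy loop computes the sum of the first `needed` cards of the flattened multiset
theorem pvGreedyA_eq_take_sum (d : PySem.Dict Int Int) (ks : List Int) (s needed : Int) :
    pvGreedyA d ks s needed = s + ((pvFlat d ks).take needed.toNat).sum := by
  induction ks generalizing s needed with
  | nil => simp [pvGreedyA, pvFlat]
  | cons k ks ih =>
    have hrep : ∀ m : Nat, (List.replicate m k).sum = (m : Int) * k := by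
      intro m; simp [List.sum_replicate]
    by_cases hc : d.getD k 0 > 0 ∧ needed > 0
    · rw [pvGreedyA]
      simp only [hc, and_self, if_true]
      by_cases hz : needed - min (d.getD k 0) needed = 0
      · have hmin : min (d.getD k 0) needed = needed := by omega
        rw [hmin, if_pos (by omega)]
        have htk : needed.toNat ≤ (d.getD k 0).toNat := by omega
        simp only [pvFlat, List.flatMap_cons, List.take_append, List.length_replicate,
          List.take_replicate, Nat.min_eq_left htk, Nat.sub_eq_zero_of_le htk, List.take_zero,
          List.sum_append, List.sum_nil, hrep]
        have h1 : ((needed.toNat : Int)) = needed := by omega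
        rw [h1]; ring
      · have hmin : min (d.getD k 0) needed = d.getD k 0 := by omega
        rw [hmin, if_neg (by omega), ih]
        have htk : (d.getD k 0).toNat ≤ needed.toNat := by omega
        simp only [pvFlat, List.flatMap_cons, List.take_append, List.length_replicate,
          List.take_replicate, Nat.min_eq_right htk, List.sum_append, hrep]
        have h1 : (needed - d.getD k 0).toNat = needed.toNat - (d.getD k 0).toNat := by omega
        have h2 : (((d.getD k 0).toNat : Int)) = d.getD k 0 := by omega
        rw [h1, h2]; ring
    · rw [pvGreedyA, if_neg hc, ih]
      by_cases hn : needed > 0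
      · have h0 : (d.getD k 0).toNat = 0 := by omega
        simp [pvFlat, h0]
      · have h0 : needed.toNat = 0 := by omega
        simp [h0]

-- dropping the positivity filter does not change the flattening
theorem pvFlat_filter (l : List (Int × Int)) :
    (l.filter (fun p => p.2 > 0)).flatMap (fun p => List.replicate p.2.toNat p.1)
      = l.flatMap (fun p => List.replicate p.2.toNat p.1) := by
  induction l with
  | nil => rfl
  | cons p l ih =>
    by_cases h : p.2 > 0
    · simp [h, ih]
    · simp [h, ih, Int.toNat_of_nonpos (le_of_not_gt h)]

-- flattening along a ≥-sorted key list is ≥-sorted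
theorem pvFlat_pairwise (d : PySem.Dict Int Int) (ks : List Int)
    (h : ks.Pairwise (fun a b => b ≤ a)) : (pvFlat d ks).Pairwise (fun a b => b ≤ a) := by
  induction ks with
  | nil => simp [pvFlat]
  | cons k ks ih =>
    rw [List.pairwise_cons] at h
    simp only [pvFlat, List.flatMap_cons]
    rw [List.pairwise_append]
    refine ⟨List.pairwise_replicate.mpr (by omega), ih h.2, ?_⟩
    intro a ha b hb
    obtain rfl := List.eq_of_mem_replicate ha
    obtain ⟨k', hk', hb⟩ := List.mem_flatMap.mp hb
    obtain rfl := List.eq_of_mem_replicate hb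
    exact h.1 _ hk'

theorem pvTempDeck_nodup (known_cards deck_list : List Int) :
    (pvTempDeck known_cards deck_list).keys.Nodup :=
  PySem.Dict.nodup_keys_foldl_insert_key _ Prod.fst (fun d p => d.getD p.1 0 - p.2) _
    (PySem.Dict.nodup_keys_counter _)

-- getD of Counter.subtract's insert-fold
theorem pvSubFold_getD_of_not_mem (l : List (Int × Int)) (d : PySem.Dict Int Int) (k : Int)
    (h : k ∉ l.map Prod.fst) :
    (l.foldl (fun d p => d.insert p.1 (d.getD p.1 0 - p.2)) d).getD k 0 = d.getD k 0 := by
  induction l generalizing d with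
  | nil => rfl
  | cons p l ih =>
    simp only [List.map_cons, List.mem_cons, not_or] at h
    rw [List.foldl_cons, ih _ h.2, PySem.Dict.getD_insert, if_neg h.1]

theorem pvSubFold_getD (l : List (Int × Int)) (d : PySem.Dict Int Int) (k : Int)
    (hl : (l.map Prod.fst).Nodup) :
    (l.foldl (fun d p => d.insert p.1 (d.getD p.1 0 - p.2)) d).getD k 0
      = d.getD k 0 - ((l.filter (fun p => p.1 == k)).map Prod.snd).sum := by
  induction l generalizing d with
  | nil => simp
  | cons p l ih =>
    simp only [List.map_cons, List.nodup_cons] at hl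
    rw [List.foldl_cons]
    by_cases hk : p.1 = k
    · subst hk
      have hfil : l.filter (fun p' : Int × Int => p'.1 == p.1) = [] := by
        rw [List.filter_eq_nil_iff]
        intro q hq
        simp only [beq_iff_eq]
        exact fun e => hl.1 (e ▸ List.mem_map_of_mem hq)
      rw [pvSubFold_getD_of_not_mem _ _ _ hl.1, PySem.Dict.getD_insert, if_pos rfl]
      simp [hfil]
    · rw [ih _ hl.2, PySem.Dict.getD_insert, if_neg (fun e => hk e.symm)]
      simp [hk]

theorem pvTempDeck_getD (known_cards deck_list : List Int) (k : Int) :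
    (pvTempDeck known_cards deck_list).getD k 0
      = (deck_list.count k : Int) - (known_cards.count k : Int) := by
  unfold pvTempDeck
  have hnodup : ((PySem.Dict.counter known_cards).items.map Prod.fst).Nodup := by
    rw [PySem.Dict.items_counter, List.map_map]
    have : (Prod.fst ∘ fun k : Int => (k, (known_cards.count k : Int))) = fun k => k := rfl
    rw [this, List.map_id']
    exact PySem.Set.nodup_ofList known_cards
  rw [pvSubFold_getD _ _ _ hnodup,
    PySem.Dict.getD_counter, PySem.Dict.items_counter, List.filter_map, List.map_map]
  simp only [Function.comp_def, List.filter_beq]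
  by_cases hk : k ∈ known_cards
  · have h1 : (PySem.Set.ofList known_cards).count k = 1 :=
      List.count_eq_one_of_mem (PySem.Set.nodup_ofList known_cards)
        ((PySem.Set.mem_ofList known_cards k).mpr hk)
    simp [h1]
  · have h1 : (PySem.Set.ofList known_cards).count k = 0 :=
      List.count_eq_zero_of_not_mem (fun h => hk ((PySem.Set.mem_ofList known_cards k).mp h))
    simp [h1, List.count_eq_zero_of_not_mem hk]

theorem pvTempDeck_values_ok (known_cards deck_list : List Int)
    (hpre : ∀ x ∈ known_cards, known_cards.count x ≤ deck_list.count x) :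
    (pvTempDeck known_cards deck_list).values.any (fun count => count < 0) = false := by
  rw [List.any_eq_false]
  intro v hv
  simp only [PySem.Dict.values, List.mem_map] at hv
  obtain ⟨⟨k, w⟩, hmem, rfl⟩ := hv
  have hget := PySem.Dict.getD_of_mem_items _ hmem (pvTempDeck_nodup known_cards deck_list) 0
  rw [pvTempDeck_getD] at hget
  simp only [decide_eq_true_eq, not_lt]
  by_cases hk : k ∈ known_cards
  · have := hpre k hk
    omega
  · have : known_cards.count k = 0 := List.count_eq_zero_of_not_mem hk
    omega

-- sorting the flat list descending is flattening along the descending key list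
theorem pvSorted_flat (d : PySem.Dict Int Int) (hnd : d.keys.Nodup) :
    PySem.List.sorted (d.items.flatMap (fun p => List.replicate p.2.toNat p.1)) (fun x => x) true
      = pvFlat d (PySem.List.sorted d.keys (fun k => k) true) := by
  have hperm : (pvFlat d (PySem.List.sorted d.keys (fun k => k) true)).Perm
      (d.items.flatMap (fun p => List.replicate p.2.toNat p.1)) := by
    rw [PySem.Dict.items_eq_map_keys d hnd 0, List.flatMap_map]
    exact List.Perm.flatMap_right _ (PySem.List.sorted_perm d.keys (fun k => k) true)
  have hsorted := pvFlat_pairwise d _ (PySem.List.sorted_pairwise_rev d.keys (fun k => k))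
  have h1 := PySem.List.sorted_perm (d.items.flatMap (fun p => List.replicate p.2.toNat p.1)) (fun x => x) true
  have h2 := PySem.List.sorted_pairwise_rev (d.items.flatMap (fun p => List.replicate p.2.toNat p.1)) (fun x => x)
  exact List.Perm.eq_of_pairwise (fun a b _ _ h h' => le_antisymm h' h) h2 hsorted (h1.trans hperm.symm)

-- ===== VERDICT (by name: the statement is the Claim_ definition above) =====
theorem deck_max_sum_with_seen_py_spec : Claim_equal_deck_max_sum_with_seen_py := by
  intro n_val known_cards deck_list _ hpre
  unfold Spec_deck_max_sum_with_seen_py deck_max_sum_with_seen_py deck_max_sum_with_seen_py_alt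
  -- under Pre_, no remaining count is negative: neither program takes the ValueError branch
  simp only [pvTempDeck_values_ok known_cards deck_list hpre, Bool.false_eq_true, if_false]
  rw [pvGreedyA_eq_take_sum,
    PySem.List.foldl_ite_eq_foldl_filter (p := fun p : Int × Int => p.2 > 0),
    PySem.List.foldl_append_eq_flatMap, List.nil_append, pvFlat_filter,
    pvSorted_flat _ (pvTempDeck_nodup known_cards deck_list),
    ← Int.ofNat_toNat, PySem.List.slice_to_natCast]
  simp [pvFlat]
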